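-- pv_equiv track=rewrite | github.com/shimamura10/Atcoder | 典型90/51_2.py | f
-- ===== SOURCE A (Python) =====
-- def f(A):
--     N = len(A)
--     res = [[] for i in range(len(A)+1)]
--     for a in A:
--         for i in reversed(range(N+1)):
--             for d in res[i]:
--                 res[i+1].append(d+a)
--         res[1].append(a)
--     for i in range(len(res)):
--         res[i].sort()
--     res[0].append(0)
--     return res
-- ===== SOURCE B (Python) =====
-- def _combos(A, k):
--     if k == 0:
--         return [[]]
--     if not A:
--         return []
--     x, rest = A[0], A[1:]
--     return [[x] + c for c in _combos(rest, k - 1)] + _combos(rest, k)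
--
--
-- def f(A):
--     N = len(A)
--     out = []
--     for i in range(N + 1):
--         if i == 0:
--             out.append([0])
--         else:
--             sums = []
--             for c in _combos(A, i):
--                 s = c[0]
--                 for v in c[1:]:
--                     s = s + v
--                 sums.append(s)
--             out.append(sorted(sums))
--     return out
-- ===== Notes on version B (the rewrite author's own statement) =====
-- stated objective: alternative
-- what changed: Replaces the incremental size-DP (which grows each size bucket from the previous one element by element) by an independent per-size enumeration: for each subset size i, list all i-combinations recursively, sum each left-to-right, and sort the bucket; the empty size contributes the single sum zero.
import Mathlib
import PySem

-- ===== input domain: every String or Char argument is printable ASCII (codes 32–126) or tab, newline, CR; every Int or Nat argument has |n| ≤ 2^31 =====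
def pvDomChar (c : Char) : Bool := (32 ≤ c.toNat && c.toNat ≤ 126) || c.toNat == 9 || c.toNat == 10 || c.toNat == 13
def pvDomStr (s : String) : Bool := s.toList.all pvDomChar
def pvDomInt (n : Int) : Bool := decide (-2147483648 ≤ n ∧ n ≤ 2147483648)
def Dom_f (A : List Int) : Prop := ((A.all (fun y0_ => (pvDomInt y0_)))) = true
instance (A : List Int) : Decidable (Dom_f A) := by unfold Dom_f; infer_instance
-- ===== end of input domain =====

-- B enumerates each subset size independently (recursive combinations, sum, sort)
-- instead of A's incremental DP over sizes: an alternative algorithm of similar cost.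

-- ===== PORT A =====
-- inner loop: for i in reversed(range(N+1)): for d in res[i]: res[i+1].append(d+a)
def fInner (a : Int) (N : Nat) (res : List (List Int)) : List (List Int) :=
  ((List.range (N + 1)).reverse).foldl
    (fun res i => res.set (i + 1) ((res.getD (i + 1) []) ++ (res.getD i []).map (fun d => d + a)))
    res

-- body of 'for a in A': the reversed-range loop, then res[1].append(a)
def fStep (N : Nat) (res : List (List Int)) (a : Int) : List (List Int) :=
  let res := fInner a N res
  res.set 1 ((res.getD 1 []) ++ [a])

def f (A : List Int) : List (List Int) :=
  let N := A.length
  let res : List (List Int) := (List.range (N + 1)).map (fun _ => [])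
  let res := A.foldl (fStep N) res
  let res := res.map (fun l => PySem.List.sorted l (fun x => x) false)
  res.set 0 ((res.getD 0 []) ++ [0])

-- ===== PORT B =====
-- _combos(A, k): all k-element combinations of A, recursively
def pvCombos : Nat → List Int → List (List Int)
  | 0, _ => [[]]
  | _ + 1, [] => []
  | k + 1, x :: rest => (pvCombos k rest).map (fun c => x :: c) ++ pvCombos (k + 1) rest

-- s = c[0]; for v in c[1:]: s = s + v    (left-to-right sum seeded by the first element)
def pvRedAdd : List Int → Int
  | [] => 0  -- unreachable in f_alt: combinations of size ≥ 1 are nonempty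
  | x :: xs => xs.foldl (fun s v => s + v) x

def f_alt (A : List Int) : List (List Int) :=
  (List.range (A.length + 1)).map (fun i =>
    if i = 0 then [0]
    else PySem.List.sorted ((pvCombos i A).map pvRedAdd) (fun x => x) false)

-- ===== PRECONDITION & SPEC =====
def Spec_f (A : List Int) (out : List (List Int)) : Prop := out = f_alt A
instance (A : List Int) (out : List (List Int)) : Decidable (Spec_f A out) := by unfold Spec_f; infer_instance

-- ===== CLAIM (what is proved, stated in full; the proofs are below) =====
def Claim_equal_f : Prop := ∀ (A : List Int), Dom_f A → Spec_f A (f A)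

-- ===== LEMMAS AND PROOFS =====

-- the multiset of size-j subset sums of p
def pvSums (j : Nat) (p : List Int) : List Int := (pvCombos j p).map pvRedAdd

lemma pvRedAdd_snoc (c : List Int) (a : Int) : pvRedAdd (c ++ [a]) = pvRedAdd c + a := by
  cases c with
  | nil => simp [pvRedAdd]
  | cons x xs => simp [pvRedAdd, List.foldl_append]

lemma pvCombos_snoc (a : Int) (p : List Int) (j : Nat) :
    (pvCombos (j + 1) (p ++ [a])).Perm
      (pvCombos (j + 1) p ++ (pvCombos j p).map (fun c => c ++ [a])) := by
  induction p generalizing j with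
  | nil =>
    cases j <;> simp [pvCombos]
  | cons x p ih =>
    cases j with
    | zero =>
      have h2 := ih 0
      simp only [pvCombos, List.map_cons, List.map_nil, List.cons_append,
        List.nil_append] at h2 ⊢
      exact h2.cons _
    | succ j' =>
      rw [← Multiset.coe_eq_coe]
      have h1 := Multiset.coe_eq_coe.mpr (ih j')
      have h2 := Multiset.coe_eq_coe.mpr (ih (j' + 1))
      simp only [pvCombos, List.cons_append, ← Multiset.coe_add, ← Multiset.map_coe] at h1 h2 ⊢
      rw [h1, h2]
      simp only [Multiset.map_add, Multiset.map_map]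
      have hc : ((fun c : List Int => c ++ [a]) ∘ (fun c => x :: c))
              = ((fun c : List Int => x :: c) ∘ (fun c => c ++ [a])) := by
        funext c; simp
      rw [hc]
      abel

lemma pvSums_snoc (a : Int) (p : List Int) (j : Nat) :
    (pvSums (j + 1) (p ++ [a])).Perm (pvSums (j + 1) p ++ (pvSums j p).map (fun d => d + a)) := by
  have h := (pvCombos_snoc a p j).map pvRedAdd
  have hf : (pvRedAdd ∘ fun c : List Int => c ++ [a]) = ((fun d => d + a) ∘ pvRedAdd) := by
    funext c; simp [pvRedAdd_snoc]
  simpa [pvSums, List.map_map, hf] using h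

lemma getD_map_range (K : Nat) (r : Nat → List Int) (i : Nat) :
    (((List.range K).map r).getD i []) = if i < K then r i else [] := by
  by_cases h : i < K
  · simp [List.getD_eq_getElem?_getD, h]
  · simp [List.getD_eq_getElem?_getD, h]

lemma set_map_range (K : Nat) (r : Nat → List Int) (j : Nat) (v : List Int) :
    (((List.range K).map r).set j v) = (List.range K).map (fun t => if t = j then v else r t) := by
  apply List.ext_getElem
  · simp
  · intro n h1 h2
    simp only [List.getElem_set, List.getElem_map, List.getElem_range]
    simp only [List.length_set, List.length_map, List.length_range] at h1
    by_cases hn : j = n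
    · subst hn; simp
    · rw [if_neg hn, if_neg (fun h => hn h.symm)]

lemma fInner_fold (a : Int) (N m : Nat) (r : Nat → List Int) (hm : m ≤ N) :
    ((List.range (m + 1)).reverse.foldl
      (fun res i => res.set (i + 1) ((res.getD (i + 1) []) ++ (res.getD i []).map (fun d => d + a)))
      ((List.range (N + 1)).map r))
    = (List.range (N + 1)).map (fun j =>
        if 1 ≤ j ∧ j ≤ min (m + 1) N then r j ++ (r (j - 1)).map (fun d => d + a) else r j) := by
  induction m generalizing r with
  | zero =>
    have h1 : (List.range (0 + 1)).reverse = [0] := rfl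
    rw [h1]
    simp only [List.foldl_cons, List.foldl_nil]
    rw [getD_map_range, getD_map_range, set_map_range]
    refine List.map_congr_left ?_
    intro t ht
    simp only [List.mem_range] at ht
    by_cases h0 : t = 1
    · rw [if_pos h0, if_pos (by omega : 0 + 1 < N + 1), if_pos (by omega : (0:ℕ) < N + 1),
        if_pos (show 1 ≤ t ∧ t ≤ min (0 + 1) N by simp only [le_min_iff]; omega)]
      subst h0; rfl
    · rw [if_neg h0, if_neg (show ¬ (1 ≤ t ∧ t ≤ min (0 + 1) N) by simp only [le_min_iff]; omega)]
  | succ m ih =>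
    have h1 : (List.range (m + 1 + 1)).reverse = (m + 1) :: (List.range (m + 1)).reverse := by
      rw [List.range_succ, List.reverse_append]
      rfl
    rw [h1, List.foldl_cons]
    rw [getD_map_range, getD_map_range, set_map_range]
    rw [ih _ (by omega)]
    refine List.map_congr_left ?_
    intro t ht
    simp only [List.mem_range] at ht
    by_cases hA : 1 ≤ t ∧ t ≤ min (m + 1) N
    · have hA' : 1 ≤ t ∧ t ≤ m + 1 ∧ t ≤ N := by
        simp only [le_min_iff] at hA; omega
      rw [if_pos hA, if_neg (show ¬ t = m + 1 + 1 by omega),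
        if_neg (show ¬ t - 1 = m + 1 + 1 by omega),
        if_pos (show 1 ≤ t ∧ t ≤ min (m + 1 + 1) N by simp only [le_min_iff]; omega)]
    · have hA' : ¬ (1 ≤ t ∧ t ≤ m + 1 ∧ t ≤ N) := by
        simp only [le_min_iff] at hA; omega
      rw [if_neg hA]
      by_cases hB : t = m + 1 + 1
      · have htN : t ≤ N := by omega
        rw [if_pos hB, if_pos (show m + 1 + 1 < N + 1 by omega),
          if_pos (show m + 1 < N + 1 by omega),
          if_pos (show 1 ≤ t ∧ t ≤ min (m + 1 + 1) N by simp only [le_min_iff]; omega)]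
        subst hB
        simp only [Nat.add_sub_cancel]
      · rw [if_neg hB,
          if_neg (show ¬ (1 ≤ t ∧ t ≤ min (m + 1 + 1) N) by simp only [le_min_iff]; omega)]

lemma foldl_fStep (N : Nat) (p : List Int) :
    ∃ r : Nat → List Int,
      p.foldl (fStep N) ((List.range (N + 1)).map (fun _ => [])) = (List.range (N + 1)).map r
      ∧ r 0 = [] ∧ ∀ j, 1 ≤ j → j ≤ N → (r j).Perm (pvSums j p) := by
  induction p using List.reverseRecOn with
  | nil =>
    refine ⟨fun _ => [], rfl, rfl, ?_⟩
    intro j h1 _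
    obtain ⟨k, rfl⟩ : ∃ k, j = k + 1 := ⟨j - 1, by omega⟩
    simp [pvSums, pvCombos]
  | append_singleton p a ih =>
    obtain ⟨r, hr, hr0, hperm⟩ := ih
    rw [List.foldl_append, hr]
    simp only [List.foldl_cons, List.foldl_nil]
    have hmin : min (N + 1) N = N := min_eq_right (Nat.le_succ N)
    have hIn : fInner a N ((List.range (N + 1)).map r)
        = (List.range (N + 1)).map (fun j =>
            if 1 ≤ j ∧ j ≤ N then r j ++ (r (j - 1)).map (fun d => d + a) else r j) := by
      unfold fInner
      rw [fInner_fold a N N r le_rfl]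
      simp only [hmin]
    unfold fStep
    dsimp only
    rw [hIn, getD_map_range, set_map_range]
    refine ⟨_, rfl, ?_, ?_⟩
    · simp [hr0]
    · intro j h1 hN2
      by_cases hj : j = 1
      · subst hj
        rw [if_pos rfl, if_pos (show 1 < N + 1 by omega),
          if_pos (show 1 ≤ 1 ∧ 1 ≤ N from ⟨le_rfl, hN2⟩), hr0]
        simp only [List.map_nil, List.append_nil]
        refine List.Perm.trans ?_ (pvSums_snoc a p 0).symm
        have hs : (pvSums 0 p).map (fun d => d + a) = [a] := by
          simp [pvSums, pvCombos, pvRedAdd]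
        rw [hs]
        exact (hperm 1 le_rfl hN2).append (List.Perm.refl [a])
      · rw [if_neg hj, if_pos (show 1 ≤ j ∧ j ≤ N from ⟨h1, hN2⟩)]
        obtain ⟨k, rfl⟩ : ∃ k, j = k + 1 := ⟨j - 1, by omega⟩
        simp only [Nat.add_sub_cancel]
        refine List.Perm.trans ?_ (pvSums_snoc a p k).symm
        exact (hperm (k + 1) h1 hN2).append ((hperm k (by omega) (by omega)).map _)

-- ===== VERDICT (by name: the statement is the Claim_ definition above) =====
theorem f_spec : Claim_equal_f := by
  intro A _
  unfold Spec_f f f_alt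
  dsimp only
  obtain ⟨r, hr, hr0, hperm⟩ := foldl_fStep A.length A
  rw [hr, List.map_map, getD_map_range, set_map_range]
  refine List.map_congr_left ?_
  intro j hj
  simp only [List.mem_range] at hj
  by_cases h0 : j = 0
  · subst h0
    rw [if_pos rfl, if_pos (by omega : 0 < A.length + 1)]
    simp [Function.comp, hr0, PySem.List.sorted_eq_nil_iff]
  · rw [if_neg h0, if_neg h0]
    simp only [Function.comp]
    exact PySem.List.sorted_eq_sorted_of_perm _ _ _ (fun a b h => h)
      (hperm j (by omega) (by omega))
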